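-- pv_equiv track=rewrite | github.com/Glaysia/peetsfea-runner | peetsfea_runner/web_status.py | _slot_summary_payload
-- ===== SOURCE A (Python) =====
-- _SLOT_QUEUED_STATES = frozenset({"QUEUED", "RETRY_QUEUED"})
--
-- _SLOT_ACTIVE_STATES = frozenset({"ASSIGNED", "LEASED", "DOWNLOADING", "UPLOADING", "RUNNING", "COLLECTING"})
--
-- _SLOT_COMPLETED_STATES = frozenset({"SUCCEEDED", "FAILED", "QUARANTINED"})
--
-- def _slot_summary_payload(slot_state_counts: dict[str, int] | None) -> dict[str, int]:
--     slot_state_counts = slot_state_counts or {}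
--     return {
--         "queued_slots": sum(int(slot_state_counts.get(state, 0)) for state in _SLOT_QUEUED_STATES),
--         "active_slots": sum(int(slot_state_counts.get(state, 0)) for state in _SLOT_ACTIVE_STATES),
--         "completed_slots": sum(int(slot_state_counts.get(state, 0)) for state in _SLOT_COMPLETED_STATES),
--         "succeeded_slots": int(slot_state_counts.get("SUCCEEDED", 0)),
--         "failed_slots": int(slot_state_counts.get("FAILED", 0)),
--         "quarantined_slots": int(slot_state_counts.get("QUARANTINED", 0)),
--     }
-- ===== SOURCE B (Python) =====
-- _SLOT_QUEUED_STATES = frozenset({"QUEUED", "RETRY_QUEUED"})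
--
-- _SLOT_ACTIVE_STATES = frozenset({"ASSIGNED", "LEASED", "DOWNLOADING", "UPLOADING", "RUNNING", "COLLECTING"})
--
-- _SLOT_COMPLETED_STATES = frozenset({"SUCCEEDED", "FAILED", "QUARANTINED"})
--
--
-- def _slot_summary_payload(slot_state_counts: dict[str, int] | None) -> dict[str, int]:
--     queued = active = completed = succeeded = failed = quarantined = 0
--     for state, value in (slot_state_counts or {}).items():
--         if state in _SLOT_QUEUED_STATES:
--             queued += int(value)
--         elif state in _SLOT_ACTIVE_STATES:
--             active += int(value)
--         elif state in _SLOT_COMPLETED_STATES: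
--             v = int(value)
--             completed += v
--             if state == "SUCCEEDED":
--                 succeeded += v
--             elif state == "FAILED":
--                 failed += v
--             else:
--                 quarantined += v
--     return {
--         "queued_slots": queued,
--         "active_slots": active,
--         "completed_slots": completed,
--         "succeeded_slots": succeeded,
--         "failed_slots": failed,
--         "quarantined_slots": quarantined,
--     }
-- ===== Notes on version B (the rewrite author's own statement) =====
-- stated objective: alternative
-- what changed: Replaces eleven dict.get lookups (one per known state) by a single pass over the items with membership tests routing each value into six accumulators.
import Mathlib
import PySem

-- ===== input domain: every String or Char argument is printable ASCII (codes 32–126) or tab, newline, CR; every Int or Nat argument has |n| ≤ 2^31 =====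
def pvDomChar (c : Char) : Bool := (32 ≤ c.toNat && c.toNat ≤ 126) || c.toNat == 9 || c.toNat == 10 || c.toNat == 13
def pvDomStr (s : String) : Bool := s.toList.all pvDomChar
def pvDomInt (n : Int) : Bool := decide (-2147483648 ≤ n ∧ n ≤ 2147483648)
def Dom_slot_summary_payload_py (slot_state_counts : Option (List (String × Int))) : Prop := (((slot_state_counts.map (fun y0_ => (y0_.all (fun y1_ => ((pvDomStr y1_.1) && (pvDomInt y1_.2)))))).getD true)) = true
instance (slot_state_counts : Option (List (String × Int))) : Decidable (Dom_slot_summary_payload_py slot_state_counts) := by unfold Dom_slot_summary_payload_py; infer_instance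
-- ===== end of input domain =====

-- B replaces A's eleven per-known-state dict lookups by a single pass over the items
-- routing each value into six accumulators (alternative decomposition, same cost class).

-- ===== PORT A =====
-- dict.get(k, 0) on the association list (first match); the frozensets are iterated
-- in a fixed literal order (the sums are order-independent).
def pvGet (l : List (String × Int)) (k : String) : Int :=
  match l with
  | [] => 0
  | (k', v) :: t => if k' = k then v else pvGet t k

def slot_summary_payload_py (slot_state_counts : Option (List (String × Int))) : List (String × Int) :=
  let d := slot_state_counts.getD []   -- `slot_state_counts or {}`
  [("queued_slots", pvGet d "QUEUED" + pvGet d "RETRY_QUEUED"),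
   ("active_slots", pvGet d "ASSIGNED" + pvGet d "LEASED" + pvGet d "DOWNLOADING"
      + pvGet d "UPLOADING" + pvGet d "RUNNING" + pvGet d "COLLECTING"),
   ("completed_slots", pvGet d "SUCCEEDED" + pvGet d "FAILED" + pvGet d "QUARANTINED"),
   ("succeeded_slots", pvGet d "SUCCEEDED"),
   ("failed_slots", pvGet d "FAILED"),
   ("quarantined_slots", pvGet d "QUARANTINED")]

-- ===== PORT B =====
def pvQueuedL : List String := ["QUEUED", "RETRY_QUEUED"]
def pvActiveL : List String := ["ASSIGNED", "LEASED", "DOWNLOADING", "UPLOADING", "RUNNING", "COLLECTING"]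
def pvCompletedL : List String := ["SUCCEEDED", "FAILED", "QUARANTINED"]

def pvStep (acc : Int × Int × Int × Int × Int × Int) (p : String × Int) :
    Int × Int × Int × Int × Int × Int :=
  match acc, p with
  | (q, a, c, s, f, qu), (k, v) =>
    if pvQueuedL.contains k then (q + v, a, c, s, f, qu)
    else if pvActiveL.contains k then (q, a + v, c, s, f, qu)
    else if pvCompletedL.contains k then
      if k = "SUCCEEDED" then (q, a, c + v, s + v, f, qu)
      else if k = "FAILED" then (q, a, c + v, s, f + v, qu)
      else (q, a, c + v, s, f, qu + v)
    else (q, a, c, s, f, qu)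

def slot_summary_payload_py_alt (slot_state_counts : Option (List (String × Int))) : List (String × Int) :=
  match (slot_state_counts.getD []).foldl pvStep (0, 0, 0, 0, 0, 0) with
  | (q, a, c, s, f, qu) =>
    [("queued_slots", q), ("active_slots", a), ("completed_slots", c),
     ("succeeded_slots", s), ("failed_slots", f), ("quarantined_slots", qu)]

-- ===== PRECONDITION & SPEC =====
-- Pre_ requires the association list's keys to be distinct — automatic for any real
-- Python dict (dicts cannot carry duplicate keys), so no Python input is excluded.
def Pre_slot_summary_payload_py (slot_state_counts : Option (List (String × Int))) : Prop :=
  ((slot_state_counts.getD []).map Prod.fst).Nodup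
instance (slot_state_counts : Option (List (String × Int))) : Decidable (Pre_slot_summary_payload_py slot_state_counts) := by unfold Pre_slot_summary_payload_py; infer_instance

def pvWitness_slot_summary_payload_py : (Option (List (String × Int))) :=
  some [("QUEUED", 2), ("FAILED", 1), ("WEIRD", 7)]

def Spec_slot_summary_payload_py (slot_state_counts : Option (List (String × Int))) (out : List (String × Int)) : Prop := out = slot_summary_payload_py_alt slot_state_counts
instance (slot_state_counts : Option (List (String × Int))) (out : List (String × Int)) : Decidable (Spec_slot_summary_payload_py slot_state_counts out) := by unfold Spec_slot_summary_payload_py; infer_instance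

-- ===== CLAIM (what is proved, stated in full; the proofs are below) =====
def Claim_equal_slot_summary_payload_py : Prop := ∀ (slot_state_counts : Option (List (String × Int))), Dom_slot_summary_payload_py slot_state_counts → Pre_slot_summary_payload_py slot_state_counts → Spec_slot_summary_payload_py slot_state_counts (slot_summary_payload_py slot_state_counts)

-- ===== LEMMAS AND PROOFS =====

-- sum of the values whose key satisfies p
def pvS (p : String → Bool) : List (String × Int) → Int
  | [] => 0
  | (k, v) :: t => (if p k then v else 0) + pvS p t

lemma pvS_congr (p q : String → Bool) (h : ∀ k, p k = q k) :
    ∀ l, pvS p l = pvS q l := by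
  intro l
  induction l with
  | nil => rfl
  | cons kv t ih => cases kv with | mk k v => simp [pvS, h k, ih]

lemma pvS_zero (p : String → Bool) :
    ∀ l : List (String × Int), (∀ kv ∈ l, p kv.1 = false) → pvS p l = 0 := by
  intro l
  induction l with
  | nil => intro _; rfl
  | cons kv t ih =>
    intro h
    cases kv with | mk k v =>
    have hk := h (k, v) (by simp)
    simp only [pvS, hk]
    simpa using ih (fun kv hkv => h kv (by simp [hkv]))

lemma pvS_or (p q : String → Bool) (h : ∀ k, p k = true → q k = false) :
    ∀ l, pvS (fun k => p k || q k) l = pvS p l + pvS q l := by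
  intro l
  induction l with
  | nil => rfl
  | cons kv t ih =>
    cases kv with | mk k v =>
    simp only [pvS, ih]
    by_cases hp : p k = true
    · have hq := h k hp
      simp only [hp, hq, Bool.true_or]
      simp only [if_true, Bool.false_eq_true, if_false]
      ring
    · simp only [Bool.not_eq_true] at hp
      by_cases hq : q k = true
      · simp only [hp, hq, Bool.false_or]
        simp only [if_true, Bool.false_eq_true, if_false]
        ring
      · simp only [Bool.not_eq_true] at hq
        simp only [hp, hq, Bool.false_or]
        simp only [Bool.false_eq_true, if_false]
        ring

lemma pvGet_eq_pvS (k : String) :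
    ∀ l : List (String × Int), (l.map Prod.fst).Nodup →
      pvS (fun k' => k' == k) l = pvGet l k := by
  intro l
  induction l with
  | nil => intro _; rfl
  | cons kv t ih =>
    intro hnd
    cases kv with | mk k' v =>
    simp only [List.map_cons, List.nodup_cons] at hnd
    by_cases hk : k' = k
    · subst hk
      have : pvS (fun k'' => k'' == k') t = 0 := by
        apply pvS_zero
        intro kv hm
        have : kv.1 ≠ k' := by
          intro he
          exact hnd.1 (he ▸ List.mem_map_of_mem hm)
        simp [this]
      simp [pvS, pvGet, this]
    · have hne : (k' == k) = false := by simp [hk]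
      simp [pvS, pvGet, hne, hk, ih hnd.2]

-- sum over a list of distinct keys
lemma pvS_keys (ks : List String) (hks : ks.Nodup) :
    ∀ l : List (String × Int), (l.map Prod.fst).Nodup →
      pvS (fun k => ks.contains k) l = (ks.map (pvGet l)).sum := by
  induction ks with
  | nil =>
    intro l _
    simp only [List.map_nil, List.sum_nil]
    exact pvS_zero _ l (by intro kv _; simp)
  | cons k ks' ih =>
    intro l hl
    simp only [List.nodup_cons] at hks
    have hdisj : ∀ k' : String, (k' == k) = true → ks'.contains k' = false := by
      intro k' hk'
      have : k' = k := by simpa using hk'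
      subst this
      simpa using hks.1
    have h1 : pvS (fun k' => (k :: ks').contains k') l
        = pvS (fun k' => (k' == k) || ks'.contains k') l := by
      apply pvS_congr; intro k'; by_cases hk : k' = k <;> simp [hk]
    rw [h1, pvS_or _ _ hdisj l, pvGet_eq_pvS k l hl, ih hks.2 l hl]
    simp

lemma pv_bool_absorb (x z : Bool) (h : z = true → x = true) : (x && z) = z := by
  cases z
  · simp
  · simp [h rfl]

lemma pQ_of_active (k : String) (h : pvActiveL.contains k = true) :
    pvQueuedL.contains k = false := by
  have hm : k ∈ pvActiveL := by simpa using h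
  simp only [pvActiveL, List.mem_cons, List.not_mem_nil, or_false] at hm
  rcases hm with h|h|h|h|h|h <;> subst h <;> decide

lemma pQA_of_completed (k : String) (h : pvCompletedL.contains k = true) :
    pvQueuedL.contains k = false ∧ pvActiveL.contains k = false := by
  have hm : k ∈ pvCompletedL := by simpa using h
  simp only [pvCompletedL, List.mem_cons, List.not_mem_nil, or_false] at hm
  rcases hm with h|h|h <;> subst h <;> exact ⟨by decide, by decide⟩

-- the six accumulation predicates, exactly as pvStep tests them
def pQ (k : String) : Bool := pvQueuedL.contains k
def pA (k : String) : Bool := !pQ k && pvActiveL.contains k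
def pC (k : String) : Bool := !pQ k && !pvActiveL.contains k && pvCompletedL.contains k
def pS (k : String) : Bool := pC k && (k == "SUCCEEDED")
def pF (k : String) : Bool := pC k && !(k == "SUCCEEDED") && (k == "FAILED")
def pQu (k : String) : Bool := pC k && !(k == "SUCCEEDED") && !(k == "FAILED")

lemma pA_eq (k : String) : pA k = pvActiveL.contains k := by
  apply pv_bool_absorb
  intro h
  have hm : k ∉ pvQueuedL := by simpa using pQ_of_active k h
  simp [pQ, hm]

lemma pC_eq (k : String) : pC k = pvCompletedL.contains k := by
  apply pv_bool_absorb
  intro h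
  obtain ⟨h1, h2⟩ := pQA_of_completed k h
  have hm1 : k ∉ pvQueuedL := by simpa using h1
  have hm2 : k ∉ pvActiveL := by simpa using h2
  simp [pQ, hm1, hm2]

lemma pS_eq (k : String) : pS k = (k == "SUCCEEDED") := by
  unfold pS
  rw [pC_eq]
  apply pv_bool_absorb
  intro h
  have : k = "SUCCEEDED" := by simpa using h
  subst this; decide

lemma pF_eq (k : String) : pF k = (k == "FAILED") := by
  unfold pF
  rw [pC_eq]
  apply pv_bool_absorb
  intro h
  have : k = "FAILED" := by simpa using h
  subst this; decide

lemma pQu_eq (k : String) : pQu k = (k == "QUARANTINED") := by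
  by_cases hk : k = "QUARANTINED"
  · subst hk; decide
  · have hr : (k == "QUARANTINED") = false := by simp [hk]
    rw [hr]
    unfold pQu
    rw [pC_eq]
    cases hc : pvCompletedL.contains k
    · simp
    · have hm : k ∈ pvCompletedL := by simpa using hc
      simp only [pvCompletedL, List.mem_cons, List.not_mem_nil, or_false] at hm
      rcases hm with h|h|h
      · subst h; decide
      · subst h; decide
      · exact absurd h hk

lemma pv_fold_char :
    ∀ (l : List (String × Int)) (q a c s f qu : Int),
      l.foldl pvStep (q, a, c, s, f, qu)
        = (q + pvS pQ l, a + pvS pA l, c + pvS pC l,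
           s + pvS pS l, f + pvS pF l, qu + pvS pQu l) := by
  intro l
  induction l with
  | nil => intro q a c s f qu; simp [pvS]
  | cons kv t ih =>
    intro q a c s f qu
    cases kv with | mk k v =>
    simp only [List.foldl_cons]
    cases h1 : pvQueuedL.contains k
    · have hm1 : k ∉ pvQueuedL := by simpa using h1
      cases h2 : pvActiveL.contains k
      · have hm2 : k ∉ pvActiveL := by simpa using h2
        cases h3 : pvCompletedL.contains k
        · have hm3 : k ∉ pvCompletedL := by simpa using h3
          have e : pvStep (q, a, c, s, f, qu) (k, v) = (q, a, c, s, f, qu) := by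
            simp [pvStep, hm1, hm2, hm3]
          rw [e, ih]
          simp only [pvS, pQ, pA, pC, pS, pF, pQu, h1, h2, h3]
          simp
        · have hm3 : k ∈ pvCompletedL := by simpa using h3
          by_cases hs : k = "SUCCEEDED"
          · have hsb : (k == "SUCCEEDED") = true := by simp [hs]
            have e : pvStep (q, a, c, s, f, qu) (k, v) = (q, a, c + v, s + v, f, qu) := by
              simp [pvStep, pvQueuedL, pvActiveL, pvCompletedL, hs]
            rw [e, ih]
            simp only [pvS, pQ, pA, pC, pS, pF, pQu, h1, h2, h3, hsb]
            simp [Prod.mk.injEq]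
            omega
          · have hsb : (k == "SUCCEEDED") = false := by simp [hs]
            by_cases hf : k = "FAILED"
            · have hfb : (k == "FAILED") = true := by simp [hf]
              have e : pvStep (q, a, c, s, f, qu) (k, v) = (q, a, c + v, s, f + v, qu) := by
                simp [pvStep, pvQueuedL, pvActiveL, pvCompletedL, hf]
              rw [e, ih]
              simp only [pvS, pQ, pA, pC, pS, pF, pQu, h1, h2, h3, hsb, hfb]
              simp [Prod.mk.injEq]
              omega
            · have hfb : (k == "FAILED") = false := by simp [hf]
              have e : pvStep (q, a, c, s, f, qu) (k, v) = (q, a, c + v, s, f, qu + v) := by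
                simp [pvStep, hm1, hm2, hm3, hs, hf]
              rw [e, ih]
              simp only [pvS, pQ, pA, pC, pS, pF, pQu, h1, h2, h3, hsb, hfb]
              simp [Prod.mk.injEq]
              omega
      · have hm2 : k ∈ pvActiveL := by simpa using h2
        have e : pvStep (q, a, c, s, f, qu) (k, v) = (q, a + v, c, s, f, qu) := by
          simp [pvStep, hm1, hm2]
        rw [e, ih]
        simp only [pvS, pQ, pA, pC, pS, pF, pQu, h1, h2]
        simp [Prod.mk.injEq]
        omega
    · have hm1 : k ∈ pvQueuedL := by simpa using h1
      have e : pvStep (q, a, c, s, f, qu) (k, v) = (q + v, a, c, s, f, qu) := by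
        simp [pvStep, hm1]
      rw [e, ih]
      simp only [pvS, pQ, pA, pC, pS, pF, pQu, h1]
      simp [Prod.mk.injEq]
      omega

-- ===== VERDICT (by name: the statement is the Claim_ definition above) =====
theorem slot_summary_payload_py_spec : Claim_equal_slot_summary_payload_py := by
  intro ssc _ pre
  unfold Spec_slot_summary_payload_py slot_summary_payload_py slot_summary_payload_py_alt
  have hnd : ((ssc.getD []).map Prod.fst).Nodup := pre
  set d := ssc.getD [] with hd
  rw [pv_fold_char d 0 0 0 0 0 0]
  have hq : pvS pQ d = pvGet d "QUEUED" + pvGet d "RETRY_QUEUED" := by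
    have h := pvS_keys pvQueuedL (by decide) d hnd
    rw [show pvS pQ d = pvS (fun k => pvQueuedL.contains k) d from rfl, h]
    simp [pvQueuedL]
  have ha : pvS pA d = pvGet d "ASSIGNED" + pvGet d "LEASED" + pvGet d "DOWNLOADING"
      + pvGet d "UPLOADING" + pvGet d "RUNNING" + pvGet d "COLLECTING" := by
    have h := pvS_keys pvActiveL (by decide) d hnd
    rw [pvS_congr pA _ pA_eq d, h]
    simp [pvActiveL]
    ring
  have hc : pvS pC d = pvGet d "SUCCEEDED" + pvGet d "FAILED" + pvGet d "QUARANTINED" := by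
    have h := pvS_keys pvCompletedL (by decide) d hnd
    rw [pvS_congr pC _ pC_eq d, h]
    simp [pvCompletedL]
    ring
  have hs : pvS pS d = pvGet d "SUCCEEDED" := by
    rw [pvS_congr pS _ pS_eq d, pvGet_eq_pvS _ d hnd]
  have hf : pvS pF d = pvGet d "FAILED" := by
    rw [pvS_congr pF _ pF_eq d, pvGet_eq_pvS _ d hnd]
  have hqu : pvS pQu d = pvGet d "QUARANTINED" := by
    rw [pvS_congr pQu _ pQu_eq d, pvGet_eq_pvS _ d hnd]
  simp [hq, ha, hc, hs, hf, hqu]
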